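-- pv_equiv track=rewrite | github.com/Frederico-21900295/Python | exercicio_1/analisa_ficheiro/calculos.py | calcula_ocorrencia_de_letras
-- ===== SOURCE A (Python) =====
-- def calcula_ocorrencia_de_letras(texto,valores_ficheiro_novo1):
--     dict = {}
--     texto = texto.lower()
--
--     for letters in texto:
--         keys = dict.keys()
--         if letters in keys:
--             dict[letters] += 1
--
--         elif (letters == '\n' or letters == ' ' or letters == '!' or letters == ',' or letters == '.'  or letters == '?'):
--             continue
--         else:
--             dict[letters] = 1
--
--     valores_ficheiro_novo1.update({'A quantidade de vezes que cada letra ocorre' : [dict] })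
--
--     return valores_ficheiro_novo1
-- ===== SOURCE B (Python) =====
-- def calcula_ocorrencia_de_letras(texto, valores_ficheiro_novo1):
--     t = texto.lower()
--     keep = [c for c in t if c not in {'\n', ' ', '!', ',', '.', '?'}]
--     d = {c: keep.count(c) for c in dict.fromkeys(keep)}
--     valores_ficheiro_novo1['A quantidade de vezes que cada letra ocorre'] = [d]
--     return valores_ficheiro_novo1
-- ===== Notes on version B (the rewrite author's own statement) =====
-- stated objective: alternative
-- what changed: Replaces the single stateful running-count loop over the text (membership test + increment/insert per character) with a declarative pipeline: filter out excluded characters once, enumerate the distinct kept characters in first-appearance order via dict.fromkeys, and build the dict by a comprehension with a full count() rescan per distinct character.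
import Mathlib
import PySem

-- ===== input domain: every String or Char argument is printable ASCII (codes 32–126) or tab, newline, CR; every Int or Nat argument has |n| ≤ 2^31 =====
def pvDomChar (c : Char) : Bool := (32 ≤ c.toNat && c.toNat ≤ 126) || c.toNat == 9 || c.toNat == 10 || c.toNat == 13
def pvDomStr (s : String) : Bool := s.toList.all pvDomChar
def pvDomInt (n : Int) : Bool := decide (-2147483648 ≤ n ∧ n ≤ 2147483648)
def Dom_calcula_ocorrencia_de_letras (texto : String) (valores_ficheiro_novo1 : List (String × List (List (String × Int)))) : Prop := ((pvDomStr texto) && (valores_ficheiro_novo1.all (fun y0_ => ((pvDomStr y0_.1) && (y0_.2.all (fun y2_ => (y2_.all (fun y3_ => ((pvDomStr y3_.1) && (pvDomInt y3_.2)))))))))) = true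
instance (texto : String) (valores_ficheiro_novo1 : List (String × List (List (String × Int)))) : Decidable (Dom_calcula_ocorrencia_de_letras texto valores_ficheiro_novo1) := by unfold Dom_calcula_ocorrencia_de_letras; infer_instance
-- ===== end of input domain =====

-- B replaces A's single running-count loop with filter + distinct-key enumeration + a count() rescan per distinct character (alternative decomposition, same cost). Python A and B both mutate valores_ficheiro_novo1 in place the same way; the theorem is about the return value.


-- characters skipped by both programs ('\n', ' ', '!', ',', '.', '?')
def pvExcl (c : Char) : Bool :=
  c == '\n' || c == ' ' || c == '!' || c == ',' || c == '.' || c == '?'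

-- ===== PORT A =====
def calcula_ocorrencia_de_letras (texto : String) (valores_ficheiro_novo1 : List (String × List (List (String × Int)))) : List (String × List (List (String × Int))) :=
  let texto := PySem.Str.lower texto
  let d : PySem.Dict String Int :=
    texto.toList.foldl (fun d letters =>
      let s := String.singleton letters
      if d.contains s then d.insert s (d.getD s 0 + 1)
      else if pvExcl letters then d
      else d.insert s 1) PySem.Dict.empty
  ((PySem.Dict.mk valores_ficheiro_novo1).insert
    "A quantidade de vezes que cada letra ocorre" [d.items]).items

-- ===== PORT B =====
def calcula_ocorrencia_de_letras_alt (texto : String) (valores_ficheiro_novo1 : List (String × List (List (String × Int)))) : List (String × List (List (String × Int))) :=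
  let t := PySem.Str.lower texto
  let keep := t.toList.filter (fun c => !pvExcl c)
  let d : List (String × Int) :=
    (PySem.List.dedup keep).map (fun c => (String.singleton c, (keep.count c : Int)))
  ((PySem.Dict.mk valores_ficheiro_novo1).insert
    "A quantidade de vezes que cada letra ocorre" [d]).items

-- ===== PRECONDITION & SPEC =====
def Spec_calcula_ocorrencia_de_letras (texto : String) (valores_ficheiro_novo1 : List (String × List (List (String × Int)))) (out : List (String × List (List (String × Int)))) : Prop := out = calcula_ocorrencia_de_letras_alt texto valores_ficheiro_novo1
instance (texto : String) (valores_ficheiro_novo1 : List (String × List (List (String × Int)))) (out : List (String × List (List (String × Int)))) : Decidable (Spec_calcula_ocorrencia_de_letras texto valores_ficheiro_novo1 out) := by unfold Spec_calcula_ocorrencia_de_letras; infer_instance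

-- ===== CLAIM (what is proved, stated in full; the proofs are below) =====
def Claim_equal_calcula_ocorrencia_de_letras : Prop := ∀ (texto : String) (valores_ficheiro_novo1 : List (String × List (List (String × Int)))), Dom_calcula_ocorrencia_de_letras texto valores_ficheiro_novo1 → Spec_calcula_ocorrencia_de_letras texto valores_ficheiro_novo1 (calcula_ocorrencia_de_letras texto valores_ficheiro_novo1)

-- ===== LEMMAS AND PROOFS =====

theorem sgl_inj : Function.Injective String.singleton := by
  intro a b h
  have := congrArg String.toList h
  simpa using this

theorem sgl_beq (a b : Char) : (String.singleton a == String.singleton b) = (a == b) := by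
  by_cases h : a = b
  · simp [h]
  · have h2 : String.singleton a ≠ String.singleton b := fun hs => h (sgl_inj hs)
    simp [h, h2]

-- A's loop, from a dict containing no excluded key, equals the insert-counting loop over the filtered list
theorem foldA_eq (l : List Char) :
    ∀ d : PySem.Dict String Int,
    (∀ c : Char, pvExcl c = true → d.contains (String.singleton c) = false) →
    l.foldl (fun d letters =>
      let s := String.singleton letters
      if d.contains s then d.insert s (d.getD s 0 + 1)
      else if pvExcl letters then d
      else d.insert s 1) d
    = (l.filter (fun c => !pvExcl c)).foldl
        (fun d c => d.insert (String.singleton c) (d.getD (String.singleton c) 0 + 1)) d := by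
  induction l with
  | nil => intro d _; rfl
  | cons c l ih =>
    intro d hd
    by_cases hc : pvExcl c = true
    · simp only [List.foldl_cons, List.filter_cons, hc, hd c hc, Bool.false_eq_true,
        if_false, Bool.not_true, if_true]
      exact ih d hd
    · have hcontF : ∀ v : Int, ∀ c' : Char, pvExcl c' = true →
          (d.insert (String.singleton c) v).contains (String.singleton c') = false := by
        intro v c' hc'
        rw [PySem.Dict.contains_insert]
        have : c' ≠ c := fun h => hc (h ▸ hc')
        simp [sgl_beq, this, hd c' hc']
      simp only [List.foldl_cons, List.filter_cons, hc]
      by_cases hm : d.contains (String.singleton c) = true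
      · simp only [hm]
        simpa using ih _ (hcontF _)
      · have hm' : d.contains (String.singleton c) = false := by
          cases h : d.contains (String.singleton c) <;> simp_all
        have h0 : d.getD (String.singleton c) 0 = 0 :=
          PySem.Dict.getD_of_not_contains _ _ hm'
        simp only [hm', Bool.false_eq_true, if_false, h0]
        have := ih (d.insert (String.singleton c) 1) (hcontF 1)
        simpa [h0] using this

-- ordered dedup commutes with mapping the injective String.singleton
theorem ofList_map_sgl (l : List Char) :
    ∀ acc : List Char,
    List.foldl PySem.Set.add (acc.map String.singleton) (l.map String.singleton)
      = (List.foldl PySem.Set.add acc l).map String.singleton := by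
  induction l with
  | nil => intro acc; rfl
  | cons c l ih =>
    intro acc
    have hstep : PySem.Set.add (acc.map String.singleton) (String.singleton c)
        = (PySem.Set.add acc c).map String.singleton := by
      by_cases h : c ∈ acc
      · simp [PySem.Set.add, PySem.Set.contains, h, List.mem_map_of_injective sgl_inj]
      · simp [PySem.Set.add, PySem.Set.contains, h, List.mem_map_of_injective sgl_inj]
    simpa [hstep] using ih (PySem.Set.add acc c)

theorem dedup_map_sgl (l : List Char) :
    PySem.Set.ofList (l.map String.singleton) = (PySem.List.dedup l).map String.singleton := by
  rw [PySem.List.dedup_eq_ofList, PySem.Set.ofList_eq_foldl, PySem.Set.ofList_eq_foldl]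
  simpa using ofList_map_sgl l []

theorem count_map_sgl (l : List Char) (c : Char) :
    (l.map String.singleton).count (String.singleton c) = l.count c :=
  List.count_map_of_injective l String.singleton sgl_inj c

-- the inner dicts agree
theorem inner_eq (t : List Char) :
    (t.foldl (fun d letters =>
      let s := String.singleton letters
      if d.contains s then d.insert s (d.getD s 0 + 1)
      else if pvExcl letters then d
      else d.insert s 1) PySem.Dict.empty).items
    = (PySem.List.dedup (t.filter (fun c => !pvExcl c))).map
        (fun c => (String.singleton c, ((t.filter (fun c => !pvExcl c)).count c : Int))) := by
  rw [foldA_eq t PySem.Dict.empty (by intro c _; simp [PySem.Dict.contains_empty])]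
  set keep := t.filter (fun c => !pvExcl c) with hk
  have h1 : keep.foldl
      (fun d c => d.insert (String.singleton c) (d.getD (String.singleton c) 0 + 1))
      PySem.Dict.empty
      = PySem.Dict.counter (keep.map String.singleton) := by
    rw [← PySem.Dict.foldl_insert_getD_add_one_eq_counter, List.foldl_map]
  rw [h1, PySem.Dict.items_counter, dedup_map_sgl, List.map_map]
  exact List.map_congr_left (fun c _ => by simp [count_map_sgl])

-- ===== VERDICT (by name: the statement is the Claim_ definition above) =====
theorem calcula_ocorrencia_de_letras_spec : Claim_equal_calcula_ocorrencia_de_letras := by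
  intro texto vals _
  unfold Spec_calcula_ocorrencia_de_letras calcula_ocorrencia_de_letras calcula_ocorrencia_de_letras_alt
  simp only [inner_eq]
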